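-- pv_equiv track=rewrite | github.com/tvdyb/baseball | src/scrape_odds.py | _pick_bookmaker
-- ===== SOURCE A (Python) =====
-- BOOKMAKER_PREFERENCE = ["draftkings", "fanduel"]
--
-- def _pick_bookmaker(bookmakers: list[dict]) -> dict | None:
--     """Pick the best bookmaker from list, following preference order.
--
--     Returns the bookmaker dict, or None if no bookmakers available.
--     """
--     if not bookmakers:
--         return None
--
--     by_key = {b["key"]: b for b in bookmakers}
--
--     for preferred in BOOKMAKER_PREFERENCE:
--         if preferred in by_key:
--             return by_key[preferred]
--
--     # Fall back to first available
--     return bookmakers[0]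
-- ===== SOURCE B (Python) =====
-- BOOKMAKER_PREFERENCE = ["draftkings", "fanduel"]
--
--
-- def _pick_bookmaker(bookmakers):
--     """Pick the best bookmaker in one pass, keeping the lowest preference rank.
--
--     Returns the bookmaker dict, or None if no bookmakers available.
--     """
--     if not bookmakers:
--         return None
--
--     rank = {key: i for i, key in enumerate(BOOKMAKER_PREFERENCE)}
--     n = len(BOOKMAKER_PREFERENCE)
--     best = None
--     best_rank = n
--     for b in bookmakers:
--         r = rank.get(b["key"], n)
--         if r < n and r <= best_rank:
--             best = b
--             best_rank = r
--     return best if best is not None else bookmakers[0]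
-- ===== Notes on version B (the rewrite author's own statement) =====
-- stated objective: alternative
-- what changed: A builds a key->bookmaker dict of the whole list and then probes it in preference order; B makes one running-minimum pass over the list keeping the best preference rank seen (ties broken toward later elements to match dict last-wins), never materialising the by_key dict.
import Mathlib
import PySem

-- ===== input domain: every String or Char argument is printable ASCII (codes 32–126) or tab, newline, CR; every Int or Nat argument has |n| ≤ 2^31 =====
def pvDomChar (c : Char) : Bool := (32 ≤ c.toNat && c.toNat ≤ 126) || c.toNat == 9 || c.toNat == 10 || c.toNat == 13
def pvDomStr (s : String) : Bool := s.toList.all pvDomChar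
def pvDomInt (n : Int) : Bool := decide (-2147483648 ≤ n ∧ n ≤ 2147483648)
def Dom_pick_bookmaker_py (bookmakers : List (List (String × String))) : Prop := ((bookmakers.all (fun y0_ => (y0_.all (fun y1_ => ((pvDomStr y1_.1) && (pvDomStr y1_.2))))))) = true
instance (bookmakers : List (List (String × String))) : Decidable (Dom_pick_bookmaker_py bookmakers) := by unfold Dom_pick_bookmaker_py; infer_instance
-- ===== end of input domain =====

-- B replaces A's build-dict-then-probe with a single running-minimum-rank pass (alternative decomposition, same cost).

def BOOKMAKER_PREFERENCE : List String := ["draftkings", "fanduel"]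

-- b["key"] on the assoc-list dict: first-match lookup; total form with default "" — exact under
-- Pre_pick_bookmaker_py, which guarantees every bookmaker has a "key" entry (else Python raises KeyError).
def pyKey (b : List (String × String)) : String :=
  (((b.find? (fun p => p.1 == "key")).map (·.2))).getD ""

-- ===== PORT A =====
def pick_bookmaker_py (bookmakers : List (List (String × String))) : Option (List (String × String)) :=
  if bookmakers = [] then none
  else
    -- by_key = {b["key"]: b for b in bookmakers}
    let by_key : PySem.Dict String (List (String × String)) :=
      bookmakers.foldl (fun d b => d.insert (pyKey b) b) PySem.Dict.empty
    -- for preferred in BOOKMAKER_PREFERENCE: if preferred in by_key: return by_key[preferred]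
    match BOOKMAKER_PREFERENCE.find? (fun p => by_key.contains p) with
    | some p => by_key.get? p
    | none => PySem.List.pyGet? bookmakers 0   -- return bookmakers[0]

-- ===== PORT B =====
def pick_bookmaker_py_alt (bookmakers : List (List (String × String))) : Option (List (String × String)) :=
  if bookmakers = [] then none
  else
    -- rank = {key: i for i, key in enumerate(BOOKMAKER_PREFERENCE)}
    let rank : PySem.Dict String Int :=
      (PySem.List.enumerate BOOKMAKER_PREFERENCE).foldl (fun d ik => d.insert ik.2 ik.1) PySem.Dict.empty
    let n : Int := (BOOKMAKER_PREFERENCE.length : Int)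
    -- one pass keeping (best, best_rank)
    let st : Option (List (String × String)) × Int :=
      bookmakers.foldl
        (fun st b =>
          let r := rank.getD (pyKey b) n
          if r < n ∧ r ≤ st.2 then (some b, r) else st)
        (none, n)
    match st.1 with
    | some b => some b
    | none => PySem.List.pyGet? bookmakers 0   -- bookmakers[0]

-- ===== PRECONDITION & SPEC =====
-- Pre_ excludes exactly the inputs where Python's b["key"] raises KeyError (some bookmaker lacks a "key"
-- entry); both A and B raise there.
def Pre_pick_bookmaker_py (bookmakers : List (List (String × String))) : Prop :=
  (bookmakers.all (fun b => b.any (fun p => p.1 == "key"))) = true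
instance (bookmakers : List (List (String × String))) : Decidable (Pre_pick_bookmaker_py bookmakers) := by
  unfold Pre_pick_bookmaker_py; infer_instance

def pvWitness_pick_bookmaker_py : (List (List (String × String))) :=
  [[("key", "x"), ("v", "1")], [("key", "fanduel")]]

def Spec_pick_bookmaker_py (bookmakers : List (List (String × String))) (out : Option (List (String × String))) : Prop := out = pick_bookmaker_py_alt bookmakers
instance (bookmakers : List (List (String × String))) (out : Option (List (String × String))) : Decidable (Spec_pick_bookmaker_py bookmakers out) := by unfold Spec_pick_bookmaker_py; infer_instance

-- ===== CLAIM (what is proved, stated in full; the proofs are below) =====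
def Claim_equal_pick_bookmaker_py : Prop := ∀ (bookmakers : List (List (String × String))), Dom_pick_bookmaker_py bookmakers → Pre_pick_bookmaker_py bookmakers → Spec_pick_bookmaker_py bookmakers (pick_bookmaker_py bookmakers)

-- ===== LEMMAS AND PROOFS =====

-- the last bookmaker in xs whose "key" is k (both programs' tie-breaking: last wins)
def lastWith (k : String) (xs : List (List (String × String))) : Option (List (String × String)) :=
  (xs.filter (fun b => pyKey b == k)).getLast?

theorem lastWith_nil (k : String) : lastWith k [] = none := rfl

theorem lastWith_append (k : String) (xs : List (List (String × String))) (x : List (String × String)) :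
    lastWith k (xs ++ [x]) =
      if pyKey x = k then some x else lastWith k xs := by
  unfold lastWith
  rw [List.filter_append]
  by_cases h : pyKey x = k
  · simp [h]
  · simp [h]

-- A's dict: lookup in the folded insert-loop is "last matching element, else the accumulator's value"
theorem get?_foldl_insert (k : String) (xs : List (List (String × String)))
    (d : PySem.Dict String (List (String × String))) :
    (xs.foldl (fun d b => d.insert (pyKey b) b) d).get? k =
      (lastWith k xs).or (d.get? k) := by
  induction xs generalizing d with
  | nil => simp [lastWith_nil]
  | cons b xs ih =>
    simp only [List.foldl_cons]
    rw [ih]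
    unfold lastWith
    by_cases h : pyKey b = k
    · simp only [List.filter_cons, h, beq_self_eq_true, if_pos, PySem.Dict.get?_insert_self]
      cases hc : (xs.filter (fun b => pyKey b == k)).getLast? with
      | none => simp [Option.or, List.getLast?_cons, hc]
      | some c => simp [Option.or, List.getLast?_cons, hc]
    · have : (pyKey b == k) = false := by simp [h]
      simp only [List.filter_cons, this, Bool.false_eq_true, if_neg, not_false_iff]
      rw [PySem.Dict.get?_insert_of_ne _ _ (by exact fun hk => h hk.symm)]

-- the shared characterisation of the result on a nonempty list
def pickSpec (bookmakers : List (List (String × String))) : Option (List (String × String)) :=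
  match lastWith "draftkings" bookmakers with
  | some b => some b
  | none =>
    match lastWith "fanduel" bookmakers with
    | some b => some b
    | none => PySem.List.pyGet? bookmakers 0

theorem pick_a_eq_spec (bookmakers : List (List (String × String))) (h : bookmakers ≠ []) :
    pick_bookmaker_py bookmakers = pickSpec bookmakers := by
  unfold pick_bookmaker_py pickSpec
  rw [if_neg h]
  have h1 : ∀ k, (bookmakers.foldl (fun d b => d.insert (pyKey b) b) PySem.Dict.empty).get? k
      = lastWith k bookmakers := by
    intro k; rw [get?_foldl_insert]; simp
  have h2 : ∀ k, (bookmakers.foldl (fun d b => d.insert (pyKey b) b) PySem.Dict.empty).contains k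
      = (lastWith k bookmakers).isSome := by
    intro k; rw [PySem.Dict.contains_eq_isSome_get?, h1]
  simp only [BOOKMAKER_PREFERENCE, List.find?]
  cases hd : lastWith "draftkings" bookmakers with
  | some b => simp [h2, hd, h1]
  | none =>
    cases hf : lastWith "fanduel" bookmakers with
    | some b => simp [h2, hd, hf, h1]
    | none => simp [h2, hd, hf]

-- B's loop state after any prefix, in terms of lastWith
def stateOf (xs : List (List (String × String))) : Option (List (String × String)) × Int :=
  match lastWith "draftkings" xs with
  | some b => (some b, 0)
  | none =>
    match lastWith "fanduel" xs with
    | some b => (some b, 1)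
    | none => (none, 2)

def bStep (st : Option (List (String × String)) × Int) (b : List (String × String)) :
    Option (List (String × String)) × Int :=
  let r := (PySem.Dict.mk [("draftkings", (0 : Int)), ("fanduel", 1)]).getD (pyKey b) 2
  if r < 2 ∧ r ≤ st.2 then (some b, r) else st

theorem foldl_bStep (xs : List (List (String × String))) :
    xs.foldl bStep (none, 2) = stateOf xs := by
  induction xs using List.reverseRecOn with
  | nil => rfl
  | append_singleton xs x ih =>
    rw [List.foldl_append, List.foldl_cons, List.foldl_nil, ih]
    unfold stateOf bStep
    rw [lastWith_append, lastWith_append]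
    by_cases hd : pyKey x = "draftkings"
    · have : pyKey x ≠ "fanduel" := by rw [hd]; decide
      cases h1 : lastWith "draftkings" xs with
      | some b => simp [hd, PySem.Dict.getD, PySem.Dict.get?]
      | none =>
        cases h2 : lastWith "fanduel" xs with
        | some b => simp [hd, PySem.Dict.getD, PySem.Dict.get?]
        | none => simp [hd, PySem.Dict.getD, PySem.Dict.get?]
    · by_cases hf : pyKey x = "fanduel"
      · cases h1 : lastWith "draftkings" xs with
        | some b => simp [hf, PySem.Dict.getD, PySem.Dict.get?]
        | none =>
          cases h2 : lastWith "fanduel" xs with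
          | some b => simp [hf, PySem.Dict.getD, PySem.Dict.get?]
          | none => simp [hf, PySem.Dict.getD, PySem.Dict.get?]
      · have hbd : ("draftkings" == pyKey x) = false := beq_eq_false_iff_ne.mpr (Ne.symm hd)
        have hbf : ("fanduel" == pyKey x) = false := beq_eq_false_iff_ne.mpr (Ne.symm hf)
        have hr : (PySem.Dict.mk [("draftkings", (0 : Int)), ("fanduel", 1)]).getD (pyKey x) 2 = 2 := by
          simp only [PySem.Dict.getD, PySem.Dict.get?, List.find?]
          rw [hbd, hbf]
          rfl
        cases h1 : lastWith "draftkings" xs with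
        | some b => simp [hd, hr]
        | none =>
          cases h2 : lastWith "fanduel" xs with
          | some b => simp [hd, hf, hr]
          | none => simp [hd, hf, hr]

theorem pick_b_eq_spec (bookmakers : List (List (String × String))) (h : bookmakers ≠ []) :
    pick_bookmaker_py_alt bookmakers = pickSpec bookmakers := by
  unfold pick_bookmaker_py_alt pickSpec
  rw [if_neg h]
  have hfold : bookmakers.foldl
      (fun st b =>
        let r := ((PySem.List.enumerate BOOKMAKER_PREFERENCE).foldl
            (fun d ik => d.insert ik.2 ik.1) PySem.Dict.empty).getD (pyKey b)
            ((BOOKMAKER_PREFERENCE.length : Int))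
        if r < (BOOKMAKER_PREFERENCE.length : Int) ∧ r ≤ st.2 then (some b, r) else st)
      (none, (BOOKMAKER_PREFERENCE.length : Int)) = stateOf bookmakers := by
    rw [← foldl_bStep]
    rfl
  simp only [hfold]
  unfold stateOf
  cases hd : lastWith "draftkings" bookmakers with
  | some b => simp
  | none =>
    cases hf : lastWith "fanduel" bookmakers with
    | some b => simp
    | none => simp

-- ===== VERDICT (by name: the statement is the Claim_ definition above) =====
theorem pick_bookmaker_py_spec : Claim_equal_pick_bookmaker_py := by
  intro bookmakers _ _
  unfold Spec_pick_bookmaker_py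
  by_cases h : bookmakers = []
  · subst h; rfl
  · rw [pick_a_eq_spec bookmakers h, pick_b_eq_spec bookmakers h]
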